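-- pv_equiv track=rewrite | github.com/RaggedR/rsk-transformer | rsk.py | is_semistandard_young_tableau
-- ===== SOURCE A (Python) =====
-- Tableau = list[list[int]]
--
-- def tableau_shape(T: Tableau) -> list[int]:
--     """Return the shape (partition) of a tableau as a list of row lengths."""
--     return [len(row) for row in T]
--
-- def is_semistandard_young_tableau(T: Tableau) -> bool:
--     """Check if T is a valid semistandard Young tableau (SSYT).
--
--     Rows are weakly increasing (≤), columns are strictly increasing (<).
--     """
--     if not T:
--         return True
--
--     shape = tableau_shape(T)
--
--     # Shape must be a partition (weakly decreasing row lengths)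
--     for i in range(len(shape) - 1):
--         if shape[i] < shape[i + 1]:
--             return False
--
--     # Rows must be weakly increasing
--     for row in T:
--         for i in range(len(row) - 1):
--             if row[i] > row[i + 1]:
--                 return False
--
--     # Columns must be strictly increasing
--     for col_idx in range(shape[0]):
--         for row_idx in range(len(T) - 1):
--             if col_idx < len(T[row_idx]) and col_idx < len(T[row_idx + 1]):
--                 if T[row_idx][col_idx] >= T[row_idx + 1][col_idx]:
--                     return False
--
--     return True
-- ===== SOURCE B (Python) =====
-- def _row_weak(row):
--     return all(a <= b for a, b in zip(row, row[1:]))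
--
-- def _rest_ok(prev, rows):
--     if not rows:
--         return True
--     cur = rows[0]
--     return (len(cur) <= len(prev)
--             and _row_weak(cur)
--             and all(p < c for p, c in zip(prev, cur))
--             and _rest_ok(cur, rows[1:]))
--
-- def is_semistandard_young_tableau(T):
--     if not T:
--         return True
--     return _row_weak(T[0]) and _rest_ok(T[0], T[1:])
-- ===== Notes on version B (the rewrite author's own statement) =====
-- stated objective: alternative
-- what changed: A makes three staged full passes (shape, then all rows, then a column-major scan over all column indices); B is a single recursive top-down pass carrying the previous row as an accumulator, checking the length, row order and column order for each row as it is reached and short-circuiting at the first violation.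
import Mathlib
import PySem

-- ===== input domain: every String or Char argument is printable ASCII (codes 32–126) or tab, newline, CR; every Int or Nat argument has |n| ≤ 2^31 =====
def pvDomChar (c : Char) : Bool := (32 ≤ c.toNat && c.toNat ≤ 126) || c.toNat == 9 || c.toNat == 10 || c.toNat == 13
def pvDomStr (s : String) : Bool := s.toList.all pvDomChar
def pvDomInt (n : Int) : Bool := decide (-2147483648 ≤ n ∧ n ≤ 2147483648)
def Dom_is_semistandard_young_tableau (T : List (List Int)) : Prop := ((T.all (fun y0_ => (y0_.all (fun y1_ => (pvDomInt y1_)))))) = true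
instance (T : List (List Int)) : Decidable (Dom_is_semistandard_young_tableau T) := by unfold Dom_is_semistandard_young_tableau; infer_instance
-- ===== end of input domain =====

-- B replaces A's three staged full passes by one recursive top-down pass that carries the
-- previous row as an accumulator and short-circuits at the first violation (alternative; same value).

-- ===== PORT A =====
def tableau_shape (T : List (List Int)) : List Int := T.map (fun row => (row.length : Int))

-- for i in range(len(shape)-1): if shape[i] < shape[i+1]: return False
def checkPartitionA : List Int → Bool
  | a :: b :: rest => if a < b then false else checkPartitionA (b :: rest)
  | _ => true

-- for i in range(len(row)-1): if row[i] > row[i+1]: return False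
def checkRowA : List Int → Bool
  | x :: y :: rest => if x > y then false else checkRowA (y :: rest)
  | _ => true

-- inner loop: for row_idx in range(len(T)-1), at fixed col_idx c
def checkColInnerA (c : Nat) : List (List Int) → Bool
  | u :: l :: rest =>
    if c < u.length ∧ c < l.length then
      if u.getD c 0 ≥ l.getD c 0 then false else checkColInnerA c (l :: rest)
    else checkColInnerA c (l :: rest)
  | _ => true

-- outer loop: for col_idx in range(shape[0])
def checkColsA (T : List (List Int)) (s : Nat) : Bool :=
  (List.range s).all (fun c => checkColInnerA c T)

def is_semistandard_young_tableau (T : List (List Int)) : Bool :=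
  match T with
  | [] => true
  | first :: rest =>
    let shape := tableau_shape (first :: rest)
    if checkPartitionA shape then
      if (first :: rest).all checkRowA then
        checkColsA (first :: rest) first.length
      else false
    else false

-- ===== PORT B =====
def rowWeak (row : List Int) : Bool :=
  (row.zip row.tail).all (fun p => p.1 ≤ p.2)

def restOk (prev : List Int) : List (List Int) → Bool
  | [] => true
  | cur :: rs =>
      decide (cur.length ≤ prev.length) && rowWeak cur &&
      (prev.zip cur).all (fun p => p.1 < p.2) && restOk cur rs

def is_semistandard_young_tableau_alt (T : List (List Int)) : Bool :=
  match T with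
  | [] => true
  | first :: rest => rowWeak first && restOk first rest

-- ===== PRECONDITION & SPEC =====
def Spec_is_semistandard_young_tableau (T : List (List Int)) (out : Bool) : Prop := out = is_semistandard_young_tableau_alt T
instance (T : List (List Int)) (out : Bool) : Decidable (Spec_is_semistandard_young_tableau T out) := by unfold Spec_is_semistandard_young_tableau; infer_instance

-- ===== CLAIM (what is proved, stated in full; the proofs are below) =====
def Claim_equal_is_semistandard_young_tableau : Prop := ∀ (T : List (List Int)), Dom_is_semistandard_young_tableau T → Spec_is_semistandard_young_tableau T (is_semistandard_young_tableau T)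

-- ===== LEMMAS AND PROOFS =====

lemma checkPartitionA_eq (xs : List Int) :
    checkPartitionA xs = !((xs.zip xs.tail).any (fun p => p.1 < p.2)) := by
  induction xs with
  | nil => simp [checkPartitionA]
  | cons a t ih =>
    cases t with
    | nil => simp [checkPartitionA]
    | cons b r =>
      simp only [checkPartitionA, List.tail_cons, List.zip_cons_cons, List.any_cons] at *
      by_cases h : a < b <;> simp [h, ih]

lemma checkRowA_eq (xs : List Int) : checkRowA xs = rowWeak xs := by
  induction xs with
  | nil => simp [checkRowA, rowWeak]
  | cons a t ih =>
    cases t with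
    | nil => simp [checkRowA, rowWeak]
    | cons b r =>
      simp only [checkRowA, rowWeak, List.tail_cons, List.zip_cons_cons, List.all_cons] at *
      by_cases h : a > b
      · simp [h, not_le.mpr h]
      · simp [h, not_lt.mp h, ih]

lemma part_iff (first : List Int) (rest : List (List Int)) :
    checkPartitionA (tableau_shape (first :: rest)) = true ↔
      ∀ p ∈ (first :: rest).zip rest, p.2.length ≤ p.1.length := by
  rw [checkPartitionA_eq]
  have hz : (tableau_shape (first :: rest)).zip (tableau_shape (first :: rest)).tail
      = ((first :: rest).zip rest).map
          (Prod.map (fun r : List Int => (r.length : Int)) (fun r : List Int => (r.length : Int))) := by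
    show (((first :: rest).map (fun r : List Int => (r.length : Int))).zip
        (((first :: rest).map (fun r : List Int => (r.length : Int))).tail)) = _
    rw [show (List.map (fun r : List Int => (r.length : Int)) (first :: rest)).tail
        = List.map (fun r : List Int => (r.length : Int)) rest from by simp,
      List.zip_map]
  rw [hz]
  simp only [Bool.not_eq_eq_eq_not, Bool.not_true, List.any_eq_false, List.mem_map]
  constructor
  · intro h p hp
    have := h _ ⟨p, hp, rfl⟩
    simp only [Prod.map, decide_eq_true_eq, not_lt] at this
    exact_mod_cast this
  · rintro h q ⟨p, hp, rfl⟩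
    have := h p hp
    simp only [Prod.map, decide_eq_true_eq, not_lt]
    exact_mod_cast this

lemma restOk_iff (prev : List Int) (rs : List (List Int)) :
    restOk prev rs = true ↔
      ∀ p ∈ (prev :: rs).zip rs,
        p.2.length ≤ p.1.length ∧ rowWeak p.2 = true ∧
          ((p.1.zip p.2).all (fun q => decide (q.1 < q.2))) = true := by
  induction rs generalizing prev with
  | nil => simp [restOk]
  | cons cur rs ih =>
    simp only [restOk, Bool.and_eq_true, decide_eq_true_eq, List.zip_cons_cons,
      List.mem_cons, forall_eq_or_imp, ih]
    tauto

-- column check rewritten as an all over adjacent row pairs (needs the partition bound)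
lemma checkColInnerA_eq (c : Nat) (T : List (List Int)) :
    checkColInnerA c T = (T.zip T.tail).all
      (fun p => if c < p.1.length ∧ c < p.2.length then !decide (p.1.getD c 0 ≥ p.2.getD c 0) else true) := by
  induction T with
  | nil => simp [checkColInnerA]
  | cons u t ih =>
    cases t with
    | nil => simp [checkColInnerA]
    | cons l r =>
      simp only [checkColInnerA, List.tail_cons, List.zip_cons_cons, List.all_cons] at *
      by_cases h : c < u.length ∧ c < l.length
      · by_cases h2 : u.getD c 0 ≥ l.getD c 0
        · have h2' : l.getD c 0 ≤ u.getD c 0 := h2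
          rw [List.getD_eq_getElem _ _ h.1, List.getD_eq_getElem _ _ h.2] at h2'
          simp [h, h2']
        · simp [h, ih]
      · simp [h, ih]

lemma all_all_comm {α β : Type} (xs : List α) (ys : List β) (f : α → β → Bool) :
    xs.all (fun a => ys.all (fun b => f a b)) = ys.all (fun b => xs.all (fun a => f a b)) := by
  rw [Bool.eq_iff_iff]
  simp only [List.all_eq_true]
  tauto

lemma range_all_col (s : Nat) (u l : List Int) (hu : u.length ≤ s) :
    (List.range s).all
      (fun c => if c < u.length ∧ c < l.length then !decide (u.getD c 0 ≥ l.getD c 0) else true)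
      = (u.zip l).all (fun q => q.1 < q.2) := by
  rw [Bool.eq_iff_iff]
  simp only [List.all_eq_true, List.mem_range]
  constructor
  · intro h q hq
    obtain ⟨i, hi, rfl⟩ := List.mem_iff_getElem.1 hq
    simp only [List.length_zip, lt_min_iff] at hi
    have := h i (lt_of_lt_of_le hi.1 hu)
    simp only [hi.1, hi.2, and_self, if_pos, Bool.not_eq_eq_eq_not, Bool.not_true,
      decide_eq_false_iff_not, not_le] at this
    simp only [List.getElem_zip, decide_eq_true_eq]
    rwa [List.getD_eq_getElem _ _ hi.1, List.getD_eq_getElem _ _ hi.2] at this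
  · intro h c _
    split_ifs with hc
    · have hmem : (u[c]'hc.1, l[c]'hc.2) ∈ u.zip l := by
        have : c < (u.zip l).length := by simp [List.length_zip]; omega
        have := List.getElem_mem this
        simpa [List.getElem_zip] using this
      have := h _ hmem
      simp only [decide_eq_true_eq] at this
      simp only [Bool.not_eq_eq_eq_not, Bool.not_true, decide_eq_false_iff_not, not_le]
      rwa [List.getD_eq_getElem _ _ hc.1, List.getD_eq_getElem _ _ hc.2]
    · rfl

lemma all_congr' {α : Type} (l : List α) (f g : α → Bool) (h : ∀ a ∈ l, f a = g a) :
    l.all f = l.all g := by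
  induction l with
  | nil => rfl
  | cons a t ih =>
    simp only [List.all_cons, h a (List.mem_cons_self)]
    rw [ih (fun b hb => h b (List.mem_cons_of_mem a hb))]

lemma chain_bound (first : List Int) (rest : List (List Int))
    (hpart : ∀ p ∈ (first :: rest).zip rest, p.2.length ≤ p.1.length) :
    ∀ p ∈ (first :: rest).zip rest, p.1.length ≤ first.length := by
  induction rest generalizing first with
  | nil => simp
  | cons cur rs ih =>
    intro p hp
    simp only [List.zip_cons_cons, List.mem_cons] at hp
    rcases hp with rfl | hp
    · exact le_refl _
    · have h1 : cur.length ≤ first.length := by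
        have := hpart (first, cur) (by simp)
        simpa using this
      have := ih cur (fun q hq => hpart q (by simp only [List.zip_cons_cons, List.mem_cons]; right; exact hq)) p hp
      omega

lemma cols_iff (first : List Int) (rest : List (List Int))
    (hpart : ∀ p ∈ (first :: rest).zip rest, p.2.length ≤ p.1.length) :
    checkColsA (first :: rest) first.length = true ↔
      ∀ p ∈ (first :: rest).zip rest, ((p.1.zip p.2).all (fun q => decide (q.1 < q.2))) = true := by
  have hbound := chain_bound first rest hpart
  unfold checkColsA
  simp only [checkColInnerA_eq, List.tail_cons]
  rw [all_all_comm]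
  rw [all_congr' _ _ (fun p => (p.1.zip p.2).all (fun q => decide (q.1 < q.2)))
      (fun p hp => range_all_col first.length p.1 p.2 (hbound p hp))]
  simp [List.all_eq_true]

-- ===== VERDICT (by name: the statement is the Claim_ definition above) =====
theorem is_semistandard_young_tableau_spec : Claim_equal_is_semistandard_young_tableau := by
  intro T _
  unfold Spec_is_semistandard_young_tableau
  cases T with
  | nil => rfl
  | cons first rest =>
    rw [Bool.eq_iff_iff]
    show is_semistandard_young_tableau (first :: rest) = true ↔
      is_semistandard_young_tableau_alt (first :: rest) = true
    unfold is_semistandard_young_tableau is_semistandard_young_tableau_alt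
    simp only [Bool.and_eq_true]
    by_cases hpart : checkPartitionA (tableau_shape (first :: rest)) = true
    · have hlen := (part_iff first rest).mp hpart
      simp only [hpart, if_true]
      by_cases hrows : ((first :: rest).all checkRowA) = true
      · have hrw : ∀ r ∈ (first :: rest), rowWeak r = true := by
          intro r hr
          have := (List.all_eq_true.mp hrows) r hr
          rwa [checkRowA_eq] at this
        simp only [hrows, if_true]
        rw [cols_iff first rest hlen, restOk_iff]
        constructor
        · intro h
          refine ⟨hrw first (by simp), fun p hp => ⟨hlen p hp, ?_, h p hp⟩⟩
          have : p.2 ∈ rest := by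
            have := List.of_mem_zip hp
            exact this.2
          exact hrw p.2 (by simp [this])
        · intro h p hp
          exact (h.2 p hp).2.2
      · simp only [hrows]
        constructor
        · intro h; exact absurd h (by simp)
        · rintro ⟨h1, h2⟩
          exfalso
          apply hrows
          rw [List.all_eq_true]
          intro r hr
          rw [checkRowA_eq]
          rcases List.mem_cons.mp hr with rfl | hr
          · exact h1
          · -- r is the .2 of some pair in the zip
            obtain ⟨i, hi, rfl⟩ := List.mem_iff_getElem.1 hr
            have hiz : i < ((first :: rest).zip rest).length := by
              simp [List.length_zip]; omega
            have hmem : ((first :: rest).zip rest)[i] ∈ (first :: rest).zip rest :=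
              List.getElem_mem hiz
            have hsnd : (((first :: rest).zip rest)[i]).2 = rest[i] := by
              simp [List.getElem_zip]
            have := ((restOk_iff first rest).mp h2) _ hmem
            rw [hsnd] at this
            exact this.2.1
    · simp only [hpart]
      constructor
      · intro h; exact absurd h (by simp)
      · rintro ⟨h1, h2⟩
        exfalso
        exact hpart ((part_iff first rest).mpr (fun p hp => ((restOk_iff first rest).mp h2 p hp).1))
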